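-- pv_equiv track=rewrite | github.com/graconfig/IF_mapping | scripts/detect_schema.py | _find_field_blocks
-- ===== SOURCE A (Python) =====
-- def _find_field_blocks(hits: list[tuple[int, int, str]]) -> list[list[tuple[int, str]]]:
--     """根据命中列表，找连续的字段块（同一行里相邻列的语义序列）。
--
--     一个"块"：相邻列（允许 1 列缺口）命中至少 3 个不同语义。
--     """
--     cols_sorted = sorted(hits, key=lambda h: h[1])
--     blocks: list[list[tuple[int, str]]] = []
--     current: list[tuple[int, str]] = []
--     prev_col: int | None = None
--     for _, col, sem in cols_sorted:
--         if prev_col is None or col - prev_col <= 2: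
--             current.append((col, sem))
--         else:
--             if len({s for _, s in current}) >= 3:
--                 blocks.append(current)
--             current = [(col, sem)]
--         prev_col = col
--     if current and len({s for _, s in current}) >= 3:
--         blocks.append(current)
--     return blocks
-- ===== SOURCE B (Python) =====
-- def _find_field_blocks(hits: list[tuple[int, int, str]]) -> list[list[tuple[int, str]]]:
--     """Two-pass rewrite: cut the column-sorted hits into maximal runs of
--     adjacent columns (gap <= 2), then keep runs with >= 3 distinct semantics."""
--     pairs = [(c, m) for _, c, m in sorted(hits, key=lambda h: h[1])]
--     runs = []
--     i, n = 0, len(pairs)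
--     while i < n:
--         j = i + 1
--         while j < n and pairs[j][0] - pairs[j - 1][0] <= 2:
--             j += 1
--         runs.append(pairs[i:j])
--         i = j
--     return [r for r in runs if len({m for _, m in r}) >= 3]
-- ===== Notes on version B (the rewrite author's own statement) =====
-- stated objective: alternative
-- what changed: A builds and filters blocks in one merged accumulator loop with a prev_col sentinel; B first cuts the sorted hits into all maximal adjacent-column runs and then, in a separate pass, filters the runs by the distinct-semantics count.
import Mathlib
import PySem

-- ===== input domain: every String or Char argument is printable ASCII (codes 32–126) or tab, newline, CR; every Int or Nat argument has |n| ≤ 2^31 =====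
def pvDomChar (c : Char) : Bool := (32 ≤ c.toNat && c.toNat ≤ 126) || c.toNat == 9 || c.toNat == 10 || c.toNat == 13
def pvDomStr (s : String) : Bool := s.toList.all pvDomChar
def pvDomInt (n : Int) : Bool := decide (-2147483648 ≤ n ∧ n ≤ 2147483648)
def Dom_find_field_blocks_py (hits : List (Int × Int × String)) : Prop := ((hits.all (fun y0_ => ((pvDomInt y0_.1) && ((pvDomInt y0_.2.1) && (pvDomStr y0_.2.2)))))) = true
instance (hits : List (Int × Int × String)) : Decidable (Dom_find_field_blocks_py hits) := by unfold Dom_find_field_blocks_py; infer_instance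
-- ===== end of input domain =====

-- B separates A's merged build-and-filter loop into two passes: cut maximal adjacent-column runs, then filter by distinct semantics (alternative decomposition, same cost).


-- ===== PORT A =====

-- len({s for _, s in r}) — the distinct-semantics count (Python set of the sems)
def pvDistinctSems (r : List (Int × String)) : Int :=
  PySem.Set.len (PySem.Set.ofList (r.map Prod.snd))

-- one iteration of A's for-loop; state = (blocks, current, prev_col)
def pvStepA (st : List (List (Int × String)) × List (Int × String) × Option Int)
    (h : Int × Int × String) :
    List (List (Int × String)) × List (Int × String) × Option Int :=
  let col := h.2.1
  let sem := h.2.2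
  match st with
  | (blocks, current, prev_col) =>
    match prev_col with
    | none => (blocks, current ++ [(col, sem)], some col)
    | some p =>
      if col - p ≤ 2 then (blocks, current ++ [(col, sem)], some col)
      else ((if 3 ≤ pvDistinctSems current then blocks ++ [current] else blocks),
            [(col, sem)], some col)

def find_field_blocks_py (hits : List (Int × Int × String)) : List (List (Int × String)) :=
  let cols_sorted := PySem.List.sorted hits (fun h => h.2.1)
  match cols_sorted.foldl pvStepA ([], [], none) with
  | (blocks, current, _) =>
    if current ≠ [] ∧ 3 ≤ pvDistinctSems current then blocks ++ [current] else blocks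

-- ===== PORT B =====

-- inner while loop of Source B: extend the run from p while the column gap is ≤ 2;
-- returns (the run starting at p, the remaining pairs)
def pvTakeRun : (Int × String) → List (Int × String) → List (Int × String) × List (Int × String)
  | p, [] => ([p], [])
  | p, q :: rest =>
    if q.1 - p.1 ≤ 2 then
      ((p :: (pvTakeRun q rest).1), (pvTakeRun q rest).2)
    else ([p], q :: rest)

-- termination measure for the outer loop (cited by pvCutRuns's decreasing_by)
theorem pvTakeRun_snd_length_le (p : Int × String) (l : List (Int × String)) :
    (pvTakeRun p l).2.length ≤ l.length := by
  induction l generalizing p with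
  | nil => simp [pvTakeRun]
  | cons q rest ih =>
    simp only [pvTakeRun]
    split
    · exact le_trans (ih q) (Nat.le_succ _)
    · simp

-- outer while loop of Source B: the list of all maximal adjacent-column runs
def pvCutRuns : List (Int × String) → List (List (Int × String))
  | [] => []
  | p :: rest => (pvTakeRun p rest).1 :: pvCutRuns (pvTakeRun p rest).2
termination_by l => l.length
decreasing_by
  exact Nat.lt_succ_of_le (pvTakeRun_snd_length_le p rest)

def find_field_blocks_py_alt (hits : List (Int × Int × String)) : List (List (Int × String)) :=
  let pairs := (PySem.List.sorted hits (fun h => h.2.1)).map (fun h => (h.2.1, h.2.2))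
  (pvCutRuns pairs).filter (fun r => decide (3 ≤ pvDistinctSems r))

-- ===== PRECONDITION & SPEC =====
def Spec_find_field_blocks_py (hits : List (Int × Int × String)) (out : List (List (Int × String))) : Prop := out = find_field_blocks_py_alt hits
instance (hits : List (Int × Int × String)) (out : List (List (Int × String))) : Decidable (Spec_find_field_blocks_py hits out) := by unfold Spec_find_field_blocks_py; infer_instance

-- ===== CLAIM (what is proved, stated in full; the proofs are below) =====
def Claim_equal_find_field_blocks_py : Prop := ∀ (hits : List (Int × Int × String)), Dom_find_field_blocks_py hits → Spec_find_field_blocks_py hits (find_field_blocks_py hits)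

-- ===== LEMMAS AND PROOFS =====

-- A-side chain splitter over the sorted TRIPLES, relative to the previous column p:
-- (the pairs A would append to current, the triples left after the first break)
def pvChainSplit : Int → List (Int × Int × String) →
    List (Int × String) × List (Int × Int × String)
  | _, [] => ([], [])
  | p, h :: t =>
    if h.2.1 - p ≤ 2 then
      (((h.2.1, h.2.2) :: (pvChainSplit h.2.1 t).1), (pvChainSplit h.2.1 t).2)
    else ([], h :: t)

-- pvTakeRun on the mapped triples is q followed by the chain split at q's column
theorem pvTakeRun_map (q : Int × String) (l : List (Int × Int × String)) :
    pvTakeRun q (l.map (fun h => (h.2.1, h.2.2))) =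
      (q :: (pvChainSplit q.1 l).1, (pvChainSplit q.1 l).2.map (fun h => (h.2.1, h.2.2))) := by
  induction l generalizing q with
  | nil => simp [pvTakeRun, pvChainSplit]
  | cons h t ih =>
    simp only [List.map_cons, pvTakeRun, pvChainSplit]
    split
    · simp [ih]
    · simp

-- the final flush of A's loop
def pvFinishA (st : List (List (Int × String)) × List (Int × String) × Option Int) :
    List (List (Int × String)) :=
  if st.2.1 ≠ [] ∧ 3 ≤ pvDistinctSems st.2.1 then st.1 ++ [st.2.1] else st.1

-- main invariant: with a nonempty current and prev_col = some p, A's remaining loop +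
-- flush equals blocks ++ the filtered runs, the first run being current extended by the chain at p
theorem pvLoop_invariant (l : List (Int × Int × String))
    (blocks : List (List (Int × String))) (cur : List (Int × String)) (p : Int)
    (hc : cur ≠ []) :
    pvFinishA (l.foldl pvStepA (blocks, cur, some p)) =
      blocks ++ (((cur ++ (pvChainSplit p l).1) ::
          pvCutRuns ((pvChainSplit p l).2.map (fun h => (h.2.1, h.2.2)))).filter
        (fun r => decide (3 ≤ pvDistinctSems r))) := by
  induction l generalizing blocks cur p with
  | nil =>
    simp only [List.foldl_nil, pvFinishA, pvChainSplit, List.append_nil]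
    simp only [List.map_nil]
    rw [show pvCutRuns ([] : List (Int × String)) = [] from by simp [pvCutRuns]]
    by_cases hok : 3 ≤ pvDistinctSems cur
    · simp [hc, hok, List.filter]
    · simp [hc, hok, List.filter]
  | cons h t ih =>
    simp only [List.foldl_cons, pvStepA, pvChainSplit]
    by_cases hgap : h.2.1 - p ≤ 2
    · simp only [hgap, if_pos]
      rw [ih _ _ _ (by simp)]
      simp
    · simp only [hgap, ite_false]
      rw [ih _ _ _ (by simp)]
      rw [show pvCutRuns ((h :: t).map (fun h => (h.2.1, h.2.2))) =
            (pvTakeRun (h.2.1, h.2.2) (t.map (fun h => (h.2.1, h.2.2)))).1 ::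
              pvCutRuns (pvTakeRun (h.2.1, h.2.2) (t.map (fun h => (h.2.1, h.2.2)))).2 from by
        simp [pvCutRuns]]
      rw [pvTakeRun_map]
      simp only [List.append_nil, List.filter_cons]
      by_cases hok : 3 ≤ pvDistinctSems cur
      · simp [hok, List.append_assoc]
      · simp [hok]

-- ===== VERDICT (by name: the statement is the Claim_ definition above) =====
theorem find_field_blocks_py_spec : Claim_equal_find_field_blocks_py := by
  intro hits _
  unfold Spec_find_field_blocks_py find_field_blocks_py find_field_blocks_py_alt
  cases hs : PySem.List.sorted hits (fun h => h.2.1) with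
  | nil => simp [pvCutRuns]
  | cons h t =>
    have key := pvLoop_invariant t [] [(h.2.1, h.2.2)] h.2.1 (by simp)
    simp only [pvFinishA] at key
    simp only [List.foldl_cons, pvStepA, List.map_cons, List.nil_append] at key ⊢
    rw [show pvCutRuns ((h.2.1, h.2.2) :: t.map (fun h => (h.2.1, h.2.2))) =
          (pvTakeRun (h.2.1, h.2.2) (t.map (fun h => (h.2.1, h.2.2)))).1 ::
            pvCutRuns (pvTakeRun (h.2.1, h.2.2) (t.map (fun h => (h.2.1, h.2.2)))).2 from by
      simp [pvCutRuns]]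
    rw [pvTakeRun_map]
    rw [key]
    simp
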